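-- pv_equiv track=rewrite | github.com/Boot-Camp-Coding-Test/Programmers | day8/problem3/[최보혜]나누어 떨어지는 숫자 배열.py | solution
-- ===== SOURCE A (Python) =====
-- def solution(arr, divisor):
--     answer = []
--     for i in arr:
--         if i%divisor==0 and i not in answer:
--             answer.append(i)
--     answer.sort()
--     if len(answer) ==0:
--         return [-1]
--     else:
--         return answer
-- ===== SOURCE B (Python) =====
-- def solution(arr, divisor):
--     answer = []
--     for i in sorted(arr):
--         if i % divisor == 0 and (not answer or i != answer[-1]):
--             answer.append(i)
--     return answer if answer else [-1]
-- ===== Notes on version B (the rewrite author's own statement) =====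
-- stated objective: alternative
-- what changed: B sorts the input up front and dedups by adjacency (comparing each divisible element to the last one kept) in a single pass, instead of A's membership test into an unsorted accumulator followed by a final sort.
import Mathlib
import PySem

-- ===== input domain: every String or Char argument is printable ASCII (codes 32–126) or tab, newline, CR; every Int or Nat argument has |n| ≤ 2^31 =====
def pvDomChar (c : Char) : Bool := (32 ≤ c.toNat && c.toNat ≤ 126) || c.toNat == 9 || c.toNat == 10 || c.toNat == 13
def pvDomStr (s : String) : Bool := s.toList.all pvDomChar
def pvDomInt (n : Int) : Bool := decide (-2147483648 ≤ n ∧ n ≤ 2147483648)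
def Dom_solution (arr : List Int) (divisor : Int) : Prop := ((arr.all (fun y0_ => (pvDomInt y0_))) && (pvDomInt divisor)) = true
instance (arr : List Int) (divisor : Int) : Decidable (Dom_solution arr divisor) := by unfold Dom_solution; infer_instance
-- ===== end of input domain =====

-- B sorts the input up front and dedups by adjacency against the last kept element in one
-- pass, instead of A's membership-test accumulator followed by a final sort (alternative
-- decomposition; return values are proved equal whenever divisor ≠ 0 or the list is empty).


-- ===== PORT A =====
def solution (arr : List Int) (divisor : Int) : List Int :=
  let answer := arr.foldl
    (fun answer i =>
      if PySem.Int.mod i divisor == 0 && !(answer.contains i) then answer ++ [i] else answer)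
    []
  let answer := PySem.List.sorted answer (fun x => x) false
  if answer.length == 0 then [-1] else answer

-- ===== PORT B =====
def solution_alt (arr : List Int) (divisor : Int) : List Int :=
  let answer := (PySem.List.sorted arr (fun x => x) false).foldl
    (fun answer i =>
      if PySem.Int.mod i divisor == 0 &&
          (match answer.getLast? with
           | none => true
           | some m => decide (i ≠ m)) then answer ++ [i] else answer)
    []
  if answer.isEmpty then [-1] else answer

-- ===== PRECONDITION & SPEC =====
-- Pre_ excludes exactly the inputs where both Pythons raise ZeroDivisionError:
-- divisor = 0 with a nonempty list (the first `i % divisor` raises).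
def Pre_solution (arr : List Int) (divisor : Int) : Prop := divisor ≠ 0 ∨ arr = []
instance (arr : List Int) (divisor : Int) : Decidable (Pre_solution arr divisor) := by unfold Pre_solution; infer_instance
def pvWitness_solution : List Int × Int := ([6, 4, 6, 3, -4], 2)
def Spec_solution (arr : List Int) (divisor : Int) (out : List Int) : Prop := out = solution_alt arr divisor
instance (arr : List Int) (divisor : Int) (out : List Int) : Decidable (Spec_solution arr divisor out) := by unfold Spec_solution; infer_instance

-- ===== CLAIM (what is proved, stated in full; the proofs are below) =====
def Claim_equal_solution : Prop := ∀ (arr : List Int) (divisor : Int), Dom_solution arr divisor → Pre_solution arr divisor → Spec_solution arr divisor (solution arr divisor)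

-- ===== LEMMAS AND PROOFS =====

-- every member of a strictly increasing list is ≤ its last element
theorem le_of_mem_pairwise_lt : ∀ {l : List Int} {x m : Int},
    l.Pairwise (· < ·) → x ∈ l → l.getLast? = some m → x ≤ m := by
  intro l
  induction l with
  | nil => intro x m _ hx _; cases hx
  | cons a t ih =>
    intro x m hp hx hl
    cases t with
    | nil =>
      simp only [List.getLast?_singleton, Option.some.injEq] at hl
      simp only [List.mem_singleton] at hx
      omega
    | cons b t' =>
      rw [List.getLast?_cons_cons] at hl
      rcases List.mem_cons.mp hx with rfl | hx'
      · have hm : m ∈ b :: t' := List.mem_of_getLast? hl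
        have := (List.pairwise_cons.mp hp).1 m hm
        omega
      · exact ih (List.pairwise_cons.mp hp).2 hx' hl

-- characterisation of A's accumulator loop: nodup, membership = filtered membership
theorem foldA_spec (d : Int) : ∀ (l acc : List Int), acc.Nodup →
    (l.foldl (fun answer i =>
      if PySem.Int.mod i d == 0 && !(answer.contains i) then answer ++ [i] else answer) acc).Nodup ∧
    (∀ x, x ∈ l.foldl (fun answer i =>
      if PySem.Int.mod i d == 0 && !(answer.contains i) then answer ++ [i] else answer) acc ↔
        x ∈ acc ∨ (x ∈ l ∧ PySem.Int.mod x d == 0)) := by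
  intro l
  induction l with
  | nil => intro acc h; simpa using h
  | cons i t ih =>
    intro acc h
    simp only [List.foldl_cons]
    by_cases hc : (PySem.Int.mod i d == 0 && !(acc.contains i)) = true
    · rw [if_pos hc]
      have hc' := hc
      rw [Bool.and_eq_true] at hc'
      have hi : i ∉ acc := by simpa using hc'.2
      have hmod := hc'.1
      have hnd : (acc ++ [i]).Nodup := by
        simp only [List.nodup_append, List.nodup_singleton, true_and]
        exact ⟨h, fun a ha b hb => by simp only [List.mem_singleton] at hb; exact hb ▸ fun e => hi (e ▸ ha)⟩
      obtain ⟨h1, h2⟩ := ih (acc ++ [i]) hnd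
      refine ⟨h1, fun x => ?_⟩
      rw [h2 x]
      simp only [List.mem_append, List.mem_cons, List.not_mem_nil, or_false]
      constructor
      · rintro ((hx | rfl) | ⟨hx, hm⟩)
        · exact Or.inl hx
        · exact Or.inr ⟨Or.inl rfl, hmod⟩
        · exact Or.inr ⟨Or.inr hx, hm⟩
      · rintro (hx | ⟨(rfl | hx), hm⟩)
        · exact Or.inl (Or.inl hx)
        · exact Or.inl (Or.inr rfl)
        · exact Or.inr ⟨hx, hm⟩
    · rw [if_neg hc]
      -- i divisible but skipped: it must already be in acc
      have hin : (PySem.Int.mod i d == 0) = true → i ∈ acc := by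
        intro hm
        cases hcon : acc.contains i with
        | false => exact absurd (by rw [Bool.and_eq_true]; exact ⟨hm, by rw [hcon]; rfl⟩) hc
        | true => simpa using hcon
      obtain ⟨h1, h2⟩ := ih acc h
      refine ⟨h1, fun x => ?_⟩
      rw [h2 x]
      simp only [List.mem_cons]
      constructor
      · rintro (hx | ⟨hx, hm⟩)
        · exact Or.inl hx
        · exact Or.inr ⟨Or.inr hx, hm⟩
      · rintro (hx | ⟨(rfl | hx), hm⟩)
        · exact Or.inl hx
        · exact Or.inl (hin hm)
        · exact Or.inr ⟨hx, hm⟩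

-- characterisation of B's adjacency-dedup loop over a nondecreasing list
theorem foldB_spec (d : Int) : ∀ (l acc : List Int),
    l.Pairwise (· ≤ ·) → acc.Pairwise (· < ·) → (∀ x ∈ acc, ∀ y ∈ l, x ≤ y) →
    (l.foldl (fun answer i =>
      if PySem.Int.mod i d == 0 &&
          (match answer.getLast? with
           | none => true
           | some m => decide (i ≠ m)) then answer ++ [i] else answer) acc).Pairwise (· < ·) ∧
    (∀ x, x ∈ l.foldl (fun answer i =>
      if PySem.Int.mod i d == 0 &&
          (match answer.getLast? with
           | none => true
           | some m => decide (i ≠ m)) then answer ++ [i] else answer) acc ↔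
        x ∈ acc ∨ (x ∈ l ∧ PySem.Int.mod x d == 0)) := by
  intro l
  induction l with
  | nil => intro acc _ hp _; simpa using hp
  | cons i t ih =>
    intro acc hl hp hle
    have hlt : t.Pairwise (· ≤ ·) := (List.pairwise_cons.mp hl).2
    have hit : ∀ y ∈ t, i ≤ y := (List.pairwise_cons.mp hl).1
    simp only [List.foldl_cons]
    by_cases hc : (PySem.Int.mod i d == 0 &&
        (match acc.getLast? with
         | none => true
         | some m => decide (i ≠ m))) = true
    · rw [if_pos hc]
      have hc' := hc
      rw [Bool.and_eq_true] at hc'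
      have hmod := hc'.1
      have hacc_lt : ∀ x ∈ acc, x < i := by
        intro x hx
        have hxle : x ≤ i := hle x hx i (List.mem_cons_self ..)
        rcases Option.eq_none_or_eq_some acc.getLast? with hn | ⟨m, hm⟩
        · simp [List.getLast?_eq_none_iff] at hn; subst hn; cases hx
        · have hne : i ≠ m := by
            have h2 := hc'.2
            rw [hm] at h2; simpa using h2
          have hxm : x ≤ m := le_of_mem_pairwise_lt hp hx hm
          have hmi : m ≤ i := hle m (List.mem_of_getLast? hm) i (List.mem_cons_self ..)
          omega
      have hp' : (acc ++ [i]).Pairwise (· < ·) := by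
        rw [List.pairwise_append]
        exact ⟨hp, List.pairwise_singleton .., by simpa using hacc_lt⟩
      have hle' : ∀ x ∈ acc ++ [i], ∀ y ∈ t, x ≤ y := by
        intro x hx y hy
        rcases List.mem_append.mp hx with hx' | hx'
        · exact hle x hx' y (List.mem_cons_of_mem _ hy)
        · simp only [List.mem_singleton] at hx'; subst hx'; exact hit y hy
      obtain ⟨h1, h2⟩ := ih (acc ++ [i]) hlt hp' hle'
      refine ⟨h1, fun x => ?_⟩
      rw [h2 x]
      simp only [List.mem_append, List.mem_cons, List.not_mem_nil, or_false]
      constructor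
      · rintro ((hx | rfl) | ⟨hx, hm⟩)
        · exact Or.inl hx
        · exact Or.inr ⟨Or.inl rfl, hmod⟩
        · exact Or.inr ⟨Or.inr hx, hm⟩
      · rintro (hx | ⟨(rfl | hx), hm⟩)
        · exact Or.inl (Or.inl hx)
        · exact Or.inl (Or.inr rfl)
        · exact Or.inr ⟨hx, hm⟩
    · rw [if_neg hc]
      -- i divisible but skipped: i equals the last kept element, hence i ∈ acc
      have hin : (PySem.Int.mod i d == 0) = true → i ∈ acc := by
        intro hm
        rcases Option.eq_none_or_eq_some acc.getLast? with hn | ⟨m, hm'⟩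
        · exact absurd (by rw [Bool.and_eq_true, hn]; exact ⟨hm, rfl⟩) hc
        · have him : i = m := by
            by_contra hne
            exact hc (by rw [Bool.and_eq_true, hm']; exact ⟨hm, by simpa using hne⟩)
          exact him ▸ List.mem_of_getLast? hm'
      have hle' : ∀ x ∈ acc, ∀ y ∈ t, x ≤ y :=
        fun x hx y hy => hle x hx y (List.mem_cons_of_mem _ hy)
      obtain ⟨h1, h2⟩ := ih acc hlt hp hle'
      refine ⟨h1, fun x => ?_⟩
      rw [h2 x]
      simp only [List.mem_cons]
      constructor
      · rintro (hx | ⟨hx, hm⟩)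
        · exact Or.inl hx
        · exact Or.inr ⟨Or.inr hx, hm⟩
      · rintro (hx | ⟨(rfl | hx), hm⟩)
        · exact Or.inl hx
        · exact Or.inl (hin hm)
        · exact Or.inr ⟨hx, hm⟩

-- ===== VERDICT (by name: the statement is the Claim_ definition above) =====
theorem solution_spec : Claim_equal_solution := by
  intro arr divisor _ _
  simp only [Spec_solution, solution, solution_alt]
  obtain ⟨hAnd, hAmem⟩ := foldA_spec divisor arr [] List.nodup_nil
  have hsorted : (PySem.List.sorted arr (fun x => x) false).Pairwise (· ≤ ·) :=
    PySem.List.sorted_pairwise ..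
  obtain ⟨hBp, hBmem⟩ := foldB_spec divisor (PySem.List.sorted arr (fun x => x) false) []
    hsorted (List.Pairwise.nil) (by intro x hx; cases hx)
  set fA := arr.foldl (fun answer i =>
      if PySem.Int.mod i divisor == 0 && !(answer.contains i) then answer ++ [i] else answer) []
  set fB := (PySem.List.sorted arr (fun x => x) false).foldl (fun answer i =>
      if PySem.Int.mod i divisor == 0 &&
          (match answer.getLast? with
           | none => true
           | some m => decide (i ≠ m)) then answer ++ [i] else answer) []
  have hmemiff : ∀ x, x ∈ fB ↔ x ∈ fA := by
    intro x
    rw [hBmem x, hAmem x, PySem.List.mem_sorted]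
  have hperm : fB.Perm fA := by
    refine (List.perm_ext_iff_of_nodup ?_ hAnd).mpr hmemiff
    exact hBp.imp (fun h => ne_of_lt h)
  have hkey : PySem.List.sorted fA (fun x => x) false = fB :=
    PySem.List.sorted_eq_of_perm_of_pairwise_lt _ _ _ hperm (by simpa using hBp)
  rw [hkey]
  have hlen : (fB.length == 0) = fB.isEmpty := by
    cases fB <;> rfl
  rw [hlen]
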